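-- pv_equiv track=rewrite | github.com/jikerbug/OIDC-music_sheet_project | make_chord_database.py | get_double_chord_list
-- ===== SOURCE A (Python) =====
-- def get_double_chord_list(chord_list_with_timestamp): # 한글 파일명은 librosa에서 로딩이 안되기 때문에 filename_id로 wav파일을 저장
--     # 확장자 변경
--     chord_list = []
--     for i in chord_list_with_timestamp:
--         chord_list.append(i['label'])
--     double_chord_list = []
--
--     for idx in range(len(chord_list) - 1):
--         if chord_list[idx] != 'N' and chord_list[idx+1] != 'N':
--
--             double_chord = chord_list[idx] + '-' + chord_list[idx+1]
--             double_chord_list.append(double_chord)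
--
--
--     return double_chord_list
-- ===== SOURCE B (Python) =====
-- def get_double_chord_list(chord_list_with_timestamp):
--     labels = [i['label'] for i in chord_list_with_timestamp]
--     # group consecutive non-'N' labels into maximal runs
--     runs = []
--     cur = []
--     for lab in labels:
--         if lab == 'N':
--             if cur:
--                 runs.append(cur)
--                 cur = []
--         else:
--             cur.append(lab)
--     if cur:
--         runs.append(cur)
--     # emit adjacent pairs within each run
--     out = []
--     for run in runs:
--         for a, b in zip(run, run[1:]):
--             out.append(a + '-' + b)
--     return out
-- ===== Notes on version B (the rewrite author's own statement) =====
-- stated objective: alternative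
-- what changed: A tests every adjacent index pair for 'both neighbours non-N'; B instead segments the label sequence into maximal runs of consecutive non-'N' labels and then pairs adjacent labels within each run, so no per-pair 'N' test remains.
import Mathlib
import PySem

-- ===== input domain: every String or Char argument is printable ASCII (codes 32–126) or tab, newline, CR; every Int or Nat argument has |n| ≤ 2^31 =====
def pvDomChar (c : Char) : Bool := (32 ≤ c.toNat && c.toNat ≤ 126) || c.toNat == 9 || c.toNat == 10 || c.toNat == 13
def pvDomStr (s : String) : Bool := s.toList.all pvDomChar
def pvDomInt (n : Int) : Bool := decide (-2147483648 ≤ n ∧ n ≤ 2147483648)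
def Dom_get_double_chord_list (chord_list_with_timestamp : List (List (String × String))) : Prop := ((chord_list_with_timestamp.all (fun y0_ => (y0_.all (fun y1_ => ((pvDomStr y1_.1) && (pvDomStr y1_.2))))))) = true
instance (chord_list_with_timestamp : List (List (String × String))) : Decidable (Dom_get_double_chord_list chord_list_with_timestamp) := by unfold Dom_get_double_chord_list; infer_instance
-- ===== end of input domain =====

-- B replaces A's per-pair "both neighbours non-'N'" index test by grouping consecutive
-- non-'N' labels into maximal runs and pairing adjacent labels within each run (alternative decomposition, same cost).

-- i['label'] on an association-list dict: first match (exact for Python's dict under Pre_, which requires the key)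
def pvLabel (i : List (String × String)) : String :=
  ((i.find? (fun p => p.1 == "label")).map (·.2)).getD ""

-- ===== PORT A =====
def get_double_chord_list (chord_list_with_timestamp : List (List (String × String))) : List String :=
  let chord_list := chord_list_with_timestamp.foldl (fun acc i => acc ++ [pvLabel i]) []
  (PySem.List.pyRange 0 ((chord_list.length : Int) - 1) 1).foldl
    (fun acc idx =>
      if PySem.List.pyGetD chord_list idx "" ≠ "N" ∧ PySem.List.pyGetD chord_list (idx + 1) "" ≠ "N" then
        acc ++ [PySem.List.pyGetD chord_list idx "" ++ "-" ++ PySem.List.pyGetD chord_list (idx + 1) ""]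
      else acc) []

-- ===== PORT B =====
def get_double_chord_list_alt (chord_list_with_timestamp : List (List (String × String))) : List String :=
  let labels := chord_list_with_timestamp.map pvLabel
  let st := labels.foldl
    (fun (s : List (List String) × List String) lab =>
      if lab = "N" then (if s.2 = [] then s else (s.1 ++ [s.2], []))
      else (s.1, s.2 ++ [lab])) ([], [])
  let runs := if st.2 = [] then st.1 else st.1 ++ [st.2]
  runs.foldl
    (fun out run =>
      (run.zip (run.drop 1)).foldl (fun o p => o ++ [p.1 ++ "-" ++ p.2]) out) []

-- ===== PRECONDITION & SPEC =====
-- Pre_ excludes exactly the inputs where some entry lacks the 'label' key: there Python A raises KeyError.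
def Pre_get_double_chord_list (chord_list_with_timestamp : List (List (String × String))) : Prop :=
  ∀ i ∈ chord_list_with_timestamp, ∃ p ∈ i, p.1 = "label"
instance (chord_list_with_timestamp : List (List (String × String))) : Decidable (Pre_get_double_chord_list chord_list_with_timestamp) := by unfold Pre_get_double_chord_list; infer_instance
def pvWitness_get_double_chord_list : (List (List (String × String))) :=
  [[("label", "C")], [("label", "N")], [("label", "G")], [("label", "Am")]]
def Spec_get_double_chord_list (chord_list_with_timestamp : List (List (String × String))) (out : List String) : Prop := out = get_double_chord_list_alt chord_list_with_timestamp
instance (chord_list_with_timestamp : List (List (String × String))) (out : List String) : Decidable (Spec_get_double_chord_list chord_list_with_timestamp out) := by unfold Spec_get_double_chord_list; infer_instance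

-- ===== CLAIM (what is proved, stated in full; the proofs are below) =====
def Claim_equal_get_double_chord_list : Prop := ∀ (chord_list_with_timestamp : List (List (String × String))), Dom_get_double_chord_list chord_list_with_timestamp → Pre_get_double_chord_list chord_list_with_timestamp → Spec_get_double_chord_list chord_list_with_timestamp (get_double_chord_list chord_list_with_timestamp)


-- ===== LEMMAS AND PROOFS =====

-- the common mathematical value: adjacent pairs of non-'N' neighbours
def pvPairs : List String → List String
  | x :: y :: t => (if x ≠ "N" ∧ y ≠ "N" then [x ++ "-" ++ y] else []) ++ pvPairs (y :: t)
  | _ => []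

-- pairs within one run (as B computes them per run)
def pvRunPairs (r : List String) : List String :=
  (r.zip (r.drop 1)).map (fun p => p.1 ++ "-" ++ p.2)

lemma pvPairs_N_cons (t : List String) : pvPairs ("N" :: t) = pvPairs t := by
  cases t with
  | nil => rfl
  | cons y u => simp [pvPairs]

lemma pvPairs_append_N : ∀ (cur t : List String), pvPairs (cur ++ "N" :: t) = pvPairs cur ++ pvPairs t
  | [], t => by simpa using pvPairs_N_cons t
  | [z], t => by
      by_cases hz : z = "N"
      · subst hz; simp [pvPairs, pvPairs_N_cons]
      · simp [pvPairs, hz, pvPairs_N_cons]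
  | x :: y :: c, t => by
      have ih := pvPairs_append_N (y :: c) t
      show pvPairs (x :: y :: (c ++ "N" :: t)) = pvPairs (x :: y :: c) ++ pvPairs t
      rw [show pvPairs (x :: y :: (c ++ "N" :: t))
            = (if x ≠ "N" ∧ y ≠ "N" then [x ++ "-" ++ y] else []) ++ pvPairs (y :: (c ++ "N" :: t)) from rfl,
          show pvPairs (x :: y :: c)
            = (if x ≠ "N" ∧ y ≠ "N" then [x ++ "-" ++ y] else []) ++ pvPairs (y :: c) from rfl]
      rw [show (y : String) :: (c ++ "N" :: t) = (y :: c) ++ "N" :: t from rfl, ih, List.append_assoc]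

lemma pvRunPairs_eq_pvPairs : ∀ (r : List String), (∀ x ∈ r, x ≠ "N") → pvRunPairs r = pvPairs r
  | [], _ => rfl
  | [_], _ => rfl
  | x :: y :: t, h => by
      have ih := pvRunPairs_eq_pvPairs (y :: t) (fun z hz => h z (List.mem_cons_of_mem x hz))
      have hx : x ≠ "N" := h x (by simp)
      have hy : y ≠ "N" := h y (by simp)
      simp only [pvRunPairs, List.drop_succ_cons, List.drop_zero, List.zip_cons_cons,
        List.map_cons] at *
      rw [ih]
      simp [pvPairs, hx, hy]

-- ===== A side =====

-- indexed pairing over range equals zip with the tail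
lemma pvZipIdx : ∀ (L : List String),
    (List.range (L.length - 1)).map (fun k => (L.getD k "", L.getD (k + 1) "")) = L.zip (L.drop 1)
  | [] => rfl
  | [_] => rfl
  | x :: y :: t => by
      have ih := pvZipIdx (y :: t)
      simp only [List.length_cons, Nat.add_sub_cancel] at *
      rw [List.range_succ_eq_map]
      simp only [List.map_cons, List.map_map, List.drop_succ_cons, List.drop_zero,
        List.zip_cons_cons] at ih ⊢
      rw [← ih]
      congr 1

-- filtered-mapped zip equals pvPairs
lemma pvZipPairs : ∀ (L : List String),
    ((L.zip (L.drop 1)).filter (fun p => decide (p.1 ≠ "N" ∧ p.2 ≠ "N"))).map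
      (fun p => p.1 ++ "-" ++ p.2) = pvPairs L
  | [] => rfl
  | [_] => rfl
  | x :: y :: t => by
      have ih := pvZipPairs (y :: t)
      simp only [List.drop_succ_cons, List.drop_zero, List.zip_cons_cons] at ih ⊢
      by_cases hc : x ≠ "N" ∧ y ≠ "N"
      · rw [List.filter_cons_of_pos (by simpa using hc), List.map_cons, ih]
        simp [pvPairs, hc]
      · rw [List.filter_cons_of_neg (by simpa using hc), ih]
        rw [show pvPairs (x :: y :: t)
              = (if x ≠ "N" ∧ y ≠ "N" then [x ++ "-" ++ y] else []) ++ pvPairs (y :: t) from rfl]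
        simp [hc]

lemma pvA_eq (L : List String) :
    (PySem.List.pyRange 0 ((L.length : Int) - 1) 1).foldl
      (fun acc idx =>
        if PySem.List.pyGetD L idx "" ≠ "N" ∧ PySem.List.pyGetD L (idx + 1) "" ≠ "N" then
          acc ++ [PySem.List.pyGetD L idx "" ++ "-" ++ PySem.List.pyGetD L (idx + 1) ""]
        else acc) [] = pvPairs L := by
  rw [PySem.List.foldl_append_ite
        (p := fun idx => PySem.List.pyGetD L idx "" ≠ "N" ∧ PySem.List.pyGetD L (idx + 1) "" ≠ "N")
        (f := fun idx => PySem.List.pyGetD L idx "" ++ "-" ++ PySem.List.pyGetD L (idx + 1) "")]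
  rw [List.nil_append]
  rw [show (fun idx : Int => decide (PySem.List.pyGetD L idx "" ≠ "N" ∧ PySem.List.pyGetD L (idx + 1) "" ≠ "N"))
        = ((fun p : String × String => decide (p.1 ≠ "N" ∧ p.2 ≠ "N"))
            ∘ (fun idx : Int => (PySem.List.pyGetD L idx "", PySem.List.pyGetD L (idx + 1) ""))) from rfl,
      show (fun idx : Int => PySem.List.pyGetD L idx "" ++ "-" ++ PySem.List.pyGetD L (idx + 1) "")
        = ((fun p : String × String => p.1 ++ "-" ++ p.2)
            ∘ (fun idx : Int => (PySem.List.pyGetD L idx "", PySem.List.pyGetD L (idx + 1) ""))) from rfl]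
  rw [← List.map_map, ← List.filter_map]
  rw [show (PySem.List.pyRange 0 ((L.length : Int) - 1) 1).map
        (fun idx : Int => (PySem.List.pyGetD L idx "", PySem.List.pyGetD L (idx + 1) ""))
        = L.zip (L.drop 1) from ?_, pvZipPairs]
  rw [PySem.List.pyRange_one, List.map_map]
  have h1 : (((L.length : Int) - 1) - 0).toNat = L.length - 1 := by omega
  rw [h1, ← pvZipIdx]
  apply List.map_congr_left
  intro k _
  simp only [Function.comp_apply, zero_add]
  rw [show ((k : Int) + 1) = ((k + 1 : Nat) : Int) from by push_cast; ring]
  rw [PySem.List.pyGetD_natCast, PySem.List.pyGetD_natCast]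

-- ===== B side =====

def pvStep (s : List (List String) × List String) (lab : String) : List (List String) × List String :=
  if lab = "N" then (if s.2 = [] then s else (s.1 ++ [s.2], []))
  else (s.1, s.2 ++ [lab])

lemma pvB_main : ∀ (t : List String) (runs : List (List String)) (cur : List String),
    (∀ x ∈ cur, x ≠ "N") →
    (if (t.foldl pvStep (runs, cur)).2 = [] then (t.foldl pvStep (runs, cur)).1
     else (t.foldl pvStep (runs, cur)).1 ++ [(t.foldl pvStep (runs, cur)).2]).flatMap pvRunPairs
    = runs.flatMap pvRunPairs ++ pvPairs (cur ++ t) := by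
  intro t
  induction t with
  | nil =>
      intro runs cur h
      by_cases hc : cur = []
      · subst hc; simp [pvPairs]
      · simp [hc, pvRunPairs_eq_pvPairs cur h]
  | cons l t' ih =>
      intro runs cur h
      rw [List.foldl_cons]
      by_cases hl : l = "N"
      · subst hl
        by_cases hc : cur = []
        · subst hc
          rw [show pvStep (runs, []) "N" = (runs, []) from by simp [pvStep]]
          rw [ih runs [] (by simp)]
          simp [pvPairs_N_cons]
        · rw [show pvStep (runs, cur) "N" = (runs ++ [cur], []) from by simp [pvStep, hc]]
          rw [ih (runs ++ [cur]) [] (by simp)]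
          simp [pvPairs_append_N, pvRunPairs_eq_pvPairs cur h, List.append_assoc]
      · have hcur' : ∀ x ∈ cur ++ [l], x ≠ "N" := by
          intro x hx
          rcases List.mem_append.mp hx with h1 | h1
          · exact h x h1
          · simp at h1; subst h1; exact hl
        rw [show pvStep (runs, cur) l = (runs, cur ++ [l]) from by simp [pvStep, hl]]
        rw [ih runs (cur ++ [l]) hcur', List.append_assoc]
        rfl

lemma pvB_eq (xs : List (List (String × String))) :
    get_double_chord_list_alt xs = pvPairs (xs.map pvLabel) := by
  unfold get_double_chord_list_alt
  have hflat : ∀ (rs : List (List String)) (init : List String),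
      rs.foldl (fun out run =>
        (run.zip (run.drop 1)).foldl (fun o p => o ++ [p.1 ++ "-" ++ p.2]) out) init
      = init ++ rs.flatMap pvRunPairs := by
    intro rs
    induction rs with
    | nil => simp
    | cons r rs ihr =>
        intro init
        rw [List.foldl_cons, PySem.List.foldl_append_singleton_eq_map, ihr,
          List.flatMap_cons, List.append_assoc]
        rfl
  rw [hflat, List.nil_append]
  have := pvB_main (xs.map pvLabel) [] [] (by simp)
  simpa using this

-- ===== VERDICT (by name: the statement is the Claim_ definition above) =====
theorem get_double_chord_list_spec : Claim_equal_get_double_chord_list := by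
  intro xs _ _
  unfold Spec_get_double_chord_list
  unfold get_double_chord_list
  rw [PySem.List.foldl_append_singleton_eq_map, List.nil_append, pvA_eq, pvB_eq]
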